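-- pv_equiv track=rewrite | github.com/42095308/LPA-Star-for-mountainous-terrain | human_risk_osm.py | classify_generic_level
-- ===== SOURCE A (Python) =====
-- from typing import Dict, Iterable, List, Optional, Sequence, Tuple
--
-- GENERIC_RISK_RULES = {
--     "L1": [
--         {"key": "sac_scale", "values": ["demanding_mountain_hiking", "alpine_hiking", "demanding_alpine_hiking"]},
--         {"key": "via_ferrata", "values": ["yes"]},
--         {"key": "hazard", "values": ["falling_rocks", "cliff", "steep_slope"]},
--     ],
--     "L2": [
--         {"key": "highway", "values": ["path", "steps", "footway", "bridleway"]},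
--         {"key": "tourism", "values": ["viewpoint", "attraction", "picnic_site"]},
--         {"key": "natural", "values": ["peak", "ridge", "cliff"]},
--     ],
--     "L3": [
--         {"key": "aerialway", "values": ["*"]},
--         {"key": "tourism", "values": ["guest_house", "alpine_hut", "camp_site", "information"]},
--         {"key": "amenity", "values": ["place_of_worship", "restaurant", "cafe", "shelter", "drinking_water"]},
--     ],
--     "L4": [
--         {"key": "highway", "values": ["tertiary", "service", "unclassified", "track"]},
--         {"key": "amenity", "values": ["toilets", "parking", "bus_station", "parking_entrance"]},
--         {"key": "tourism", "values": ["hotel", "museum"]},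
--     ],
-- }
--
-- def _norm(s: Optional[str]) -> str:
--     return str(s or "").strip()
--
-- def _tag_l(tags: Dict[str, str], key: str) -> str:
--     return _norm(tags.get(key)).lower()
--
-- def _match_rule_value(actual: str, values: Sequence[str]) -> bool:
--     if not actual:
--         return False
--     vals = {str(v).strip().lower() for v in values}
--     return "*" in vals or actual.lower() in vals
--
-- def classify_generic_level(tags: Dict[str, str]) -> Optional[int]:
--     """先按通用 OSM 标签规则分类，保证换场景后仍有风险底座。"""
--     for level_name in ("L1", "L2", "L3", "L4"):
--         for rule in GENERIC_RISK_RULES.get(level_name, []):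
--             key = str(rule.get("key", "")).strip()
--             vals = rule.get("values", [])
--             if key and _match_rule_value(_tag_l(tags, key), vals):
--                 return int(level_name[1])
--     return None
-- ===== SOURCE B (Python) =====
-- # Tag-driven re-implementation: precompute once a (key, value) -> lowest level table
-- # (plus wildcard keys) from GENERIC_RISK_RULES, then classify by a single pass over
-- # the tags taking the minimum matched level.
-- from typing import Dict, Optional
--
-- GENERIC_RISK_RULES = {
--     "L1": [
--         {"key": "sac_scale", "values": ["demanding_mountain_hiking", "alpine_hiking", "demanding_alpine_hiking"]},
--         {"key": "via_ferrata", "values": ["yes"]},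
--         {"key": "hazard", "values": ["falling_rocks", "cliff", "steep_slope"]},
--     ],
--     "L2": [
--         {"key": "highway", "values": ["path", "steps", "footway", "bridleway"]},
--         {"key": "tourism", "values": ["viewpoint", "attraction", "picnic_site"]},
--         {"key": "natural", "values": ["peak", "ridge", "cliff"]},
--     ],
--     "L3": [
--         {"key": "aerialway", "values": ["*"]},
--         {"key": "tourism", "values": ["guest_house", "alpine_hut", "camp_site", "information"]},
--         {"key": "amenity", "values": ["place_of_worship", "restaurant", "cafe", "shelter", "drinking_water"]},
--     ],
--     "L4": [
--         {"key": "highway", "values": ["tertiary", "service", "unclassified", "track"]},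
--         {"key": "amenity", "values": ["toilets", "parking", "bus_station", "parking_entrance"]},
--         {"key": "tourism", "values": ["hotel", "museum"]},
--     ],
-- }
--
--
-- def _build_indexes():
--     exact = {}      # (key, normalized value) -> lowest matching level
--     wildcard = {}   # key with a '*' rule -> lowest matching level
--     for name in ("L1", "L2", "L3", "L4"):
--         level = int(name[1])
--         for rule in GENERIC_RISK_RULES[name]:
--             key = str(rule["key"]).strip()
--             if not key:
--                 continue
--             for value in rule["values"]:
--                 v = str(value).strip().lower()
--                 if v == "*":
--                     wildcard.setdefault(key, level)
--                 else:
--                     exact.setdefault((key, v), level)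
--     return exact, wildcard
--
--
-- _EXACT, _WILDCARD = _build_indexes()
--
--
-- def classify_generic_level(tags: Dict[str, str]) -> Optional[int]:
--     best = None
--     for key, value in tags.items():
--         v = str(value or "").strip().lower()
--         if not v:
--             continue
--         for cand in (_WILDCARD.get(key), _EXACT.get((key, v))):
--             if cand is not None and (best is None or cand < best):
--                 best = cand
--     return best
-- ===== Notes on version B (the rewrite author's own statement) =====
-- stated objective: alternative
-- what changed: The rule-driven scan (for each of 12 rules, look up the tag and build a normalized value set per call) is replaced by a module-level precomputed (key,value)->lowest-level table plus a wildcard-key map, and classification becomes a single tag-driven pass taking the minimum matched level.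
import Mathlib
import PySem

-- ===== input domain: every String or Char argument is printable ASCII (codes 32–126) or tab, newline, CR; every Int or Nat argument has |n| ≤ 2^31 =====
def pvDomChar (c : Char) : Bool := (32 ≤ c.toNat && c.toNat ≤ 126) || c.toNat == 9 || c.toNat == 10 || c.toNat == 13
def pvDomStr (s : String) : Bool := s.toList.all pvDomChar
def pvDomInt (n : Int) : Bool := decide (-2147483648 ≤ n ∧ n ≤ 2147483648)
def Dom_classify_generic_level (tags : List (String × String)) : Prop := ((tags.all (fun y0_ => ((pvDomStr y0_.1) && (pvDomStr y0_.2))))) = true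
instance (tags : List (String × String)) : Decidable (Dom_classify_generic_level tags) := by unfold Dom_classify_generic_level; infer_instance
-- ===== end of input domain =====

set_option maxRecDepth 8192
set_option maxHeartbeats 1000000


-- B replaces A's per-call rule scan by a precomputed (key,value)->lowest-level table and one
-- tag-driven pass taking the minimum matched level (alternative algorithm, same results).

-- ===== PORT A =====
-- the module constant GENERIC_RISK_RULES: level name ↦ list of rules (key, values)
def genericRiskRules : PySem.Dict String (List (String × List String)) :=
  PySem.Dict.ofList [
    ("L1", [("sac_scale", ["demanding_mountain_hiking", "alpine_hiking", "demanding_alpine_hiking"]),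
            ("via_ferrata", ["yes"]),
            ("hazard", ["falling_rocks", "cliff", "steep_slope"])]),
    ("L2", [("highway", ["path", "steps", "footway", "bridleway"]),
            ("tourism", ["viewpoint", "attraction", "picnic_site"]),
            ("natural", ["peak", "ridge", "cliff"])]),
    ("L3", [("aerialway", ["*"]),
            ("tourism", ["guest_house", "alpine_hut", "camp_site", "information"]),
            ("amenity", ["place_of_worship", "restaurant", "cafe", "shelter", "drinking_water"])]),
    ("L4", [("highway", ["tertiary", "service", "unclassified", "track"]),
            ("amenity", ["toilets", "parking", "bus_station", "parking_entrance"]),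
            ("tourism", ["hotel", "museum"])])]

-- _norm(s): str(s or "").strip()   (s : Optional[str])
def normA (s : Option String) : String := PySem.Str.strip (s.getD "")

-- _tag_l(tags, key): _norm(tags.get(key)).lower()
def tagL (tags : List (String × String)) (key : String) : String :=
  PySem.Str.lower (normA (PySem.Dict.get? ⟨tags⟩ key))

-- _match_rule_value(actual, values)
def matchRuleValue (actual : String) (values : List String) : Bool :=
  if actual = "" then false
  else
    let vals : PySem.Set String :=
      PySem.Set.ofList (values.map (fun v => PySem.Str.lower (PySem.Str.strip v)))
    PySem.Set.contains vals "*" || PySem.Set.contains vals (PySem.Str.lower actual)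

-- int(level_name[1]); the .getD defaults are never reached on the four literal level names
def levelNum (name : String) : Int :=
  (((PySem.Str.pyGet? name 1).map (fun c => String.ofList [c])).bind PySem.Int.ofStr?).getD 0

-- the inner 'for rule in GENERIC_RISK_RULES.get(level_name, [])' loop with early return
def findRule (tags : List (String × String)) (name : String) :
    List (String × List String) → Option Int
  | [] => none
  | (rkey, vals) :: rest =>
    let key := PySem.Str.strip rkey
    if key != "" && matchRuleValue (tagL tags key) vals then some (levelNum name)
    else findRule tags name rest

-- the outer 'for level_name in ("L1","L2","L3","L4")' loop with early return
def findLevel (tags : List (String × String)) : List String → Option Int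
  | [] => none
  | name :: rest =>
    match findRule tags name ((PySem.Dict.get? genericRiskRules name).getD []) with
    | some r => some r
    | none => findLevel tags rest

def classify_generic_level (tags : List (String × String)) : Option Int :=
  findLevel tags ["L1", "L2", "L3", "L4"]

-- ===== PORT B =====
-- str(value).strip().lower() as used by Source B
def normB (v : String) : String := PySem.Str.lower (PySem.Str.strip v)

-- body of _build_indexes's per-rule loop
def addRuleB (level : Int)
    (acc : PySem.Dict (String × String) Int × PySem.Dict String Int)
    (rule : String × List String) :
    PySem.Dict (String × String) Int × PySem.Dict String Int :=
  let key := PySem.Str.strip rule.1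
  if key = "" then acc
  else rule.2.foldl (fun acc value =>
    let v := normB value
    if v = "*" then (acc.1, PySem.Dict.setdefault acc.2 key level)
    else (PySem.Dict.setdefault acc.1 (key, v) level, acc.2)) acc

-- _EXACT, _WILDCARD = _build_indexes()
def builtIndexes : PySem.Dict (String × String) Int × PySem.Dict String Int :=
  ["L1", "L2", "L3", "L4"].foldl (fun acc name =>
    ((PySem.Dict.get? genericRiskRules name).getD []).foldl (addRuleB (levelNum name)) acc)
    (PySem.Dict.empty, PySem.Dict.empty)

-- the body of B's per-tag loop ('for cand in (…, …)' ported as a fold over the two-element list)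
def bStep (best : Option Int) (kv : String × String) : Option Int :=
  let v := normB kv.2
  if v = "" then best
  else
    [PySem.Dict.get? builtIndexes.2 kv.1, PySem.Dict.get? builtIndexes.1 (kv.1, v)].foldl
      (fun best cand =>
        match cand with
        | none => best
        | some c =>
          match best with
          | none => some c
          | some b => if c < b then some c else best) best

def classify_generic_level_alt (tags : List (String × String)) : Option Int :=
  tags.foldl bStep none

-- ===== PRECONDITION & SPEC =====
-- Pre_ excludes association lists with duplicate keys only: those do not represent a Python
-- dict (dict keys are unique), so no input the Python A accepts is excluded.
def Pre_classify_generic_level (tags : List (String × String)) : Prop :=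
  (tags.map Prod.fst).Nodup
instance (tags : List (String × String)) : Decidable (Pre_classify_generic_level tags) := by
  unfold Pre_classify_generic_level; infer_instance

def pvWitness_classify_generic_level : (List (String × String)) := ([("highway", "path"), ("name", "x")])

def Spec_classify_generic_level (tags : List (String × String)) (out : Option Int) : Prop := out = classify_generic_level_alt tags
instance (tags : List (String × String)) (out : Option Int) : Decidable (Spec_classify_generic_level tags out) := by unfold Spec_classify_generic_level; infer_instance

-- ===== CLAIM (what is proved, stated in full; the proofs are below) =====
def Claim_equal_classify_generic_level : Prop := ∀ (tags : List (String × String)), Dom_classify_generic_level tags → Pre_classify_generic_level tags → Spec_classify_generic_level tags (classify_generic_level tags)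

-- ===== LEMMAS AND PROOFS =====

-- minimum of two optional levels (none = no candidate)
def omin : Option Int → Option Int → Option Int
  | none, b => b
  | some a, none => some a
  | some a, some b => some (min a b)

lemma omin_none_left (b : Option Int) : omin none b = b := rfl

lemma omin_none_right (a : Option Int) : omin a none = a := by cases a <;> rfl

lemma omin_assoc (a b c : Option Int) : omin (omin a b) c = omin a (omin b c) := by
  cases a <;> cases b <;> cases c <;> simp [omin, min_assoc]

lemma omin_left_comm (a b c : Option Int) : omin a (omin b c) = omin b (omin a c) := by
  cases a <;> cases b <;> cases c <;> simp [omin, min_left_comm, min_comm]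

-- B's per-tag candidate
def fB (kv : String × String) : Option Int :=
  let v := normB kv.2
  if v = "" then none
  else omin (PySem.Dict.get? builtIndexes.2 kv.1) (PySem.Dict.get? builtIndexes.1 (kv.1, v))

lemma bStep_eq (best : Option Int) (kv : String × String) :
    bStep best kv = omin best (fB kv) := by
  unfold bStep fB
  by_cases h : normB kv.2 = ""
  · rw [if_pos h, if_pos h, omin_none_right]
  · rw [if_neg h, if_neg h]
    simp only [List.foldl]
    rcases PySem.Dict.get? builtIndexes.2 kv.1 with _ | c1 <;>
      rcases PySem.Dict.get? builtIndexes.1 (kv.1, normB kv.2) with _ | c2 <;>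
        rcases best with _ | b <;>
          simp [omin, min_def] <;> split_ifs <;> simp_all <;> omega

lemma foldl_omin (l : List (String × String)) (x : Option Int) :
    l.foldl (fun b kv => omin b (fB kv)) x
      = omin x (l.foldl (fun b kv => omin b (fB kv)) none) := by
  induction l generalizing x with
  | nil => exact (omin_none_right x).symm
  | cons a l ih =>
    simp only [List.foldl]
    rw [ih (omin x (fB a)), ih (omin none (fB a))]
    exact omin_assoc x (fB a) _

lemma alt_eq (tags : List (String × String)) :
    classify_generic_level_alt tags = tags.foldl (fun b kv => omin b (fB kv)) none := by
  unfold classify_generic_level_alt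
  apply PySem.List.foldl_congr_mem
  intro acc x _
  exact bStep_eq acc x

lemma alt_cons (kv : String × String) (rest : List (String × String)) :
    classify_generic_level_alt (kv :: rest) = omin (fB kv) (classify_generic_level_alt rest) := by
  rw [alt_eq, alt_eq]
  simp only [List.foldl]
  rw [foldl_omin]
  rfl

-- ----- A as a minimum over the flattened rule list -----

def flatRules : List (Int × String × List String) :=
  [(1, "sac_scale", ["demanding_mountain_hiking", "alpine_hiking", "demanding_alpine_hiking"]),
   (1, "via_ferrata", ["yes"]),
   (1, "hazard", ["falling_rocks", "cliff", "steep_slope"]),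
   (2, "highway", ["path", "steps", "footway", "bridleway"]),
   (2, "tourism", ["viewpoint", "attraction", "picnic_site"]),
   (2, "natural", ["peak", "ridge", "cliff"]),
   (3, "aerialway", ["*"]),
   (3, "tourism", ["guest_house", "alpine_hut", "camp_site", "information"]),
   (3, "amenity", ["place_of_worship", "restaurant", "cafe", "shelter", "drinking_water"]),
   (4, "highway", ["tertiary", "service", "unclassified", "track"]),
   (4, "amenity", ["toilets", "parking", "bus_station", "parking_entrance"]),
   (4, "tourism", ["hotel", "museum"])]

def rcond (tags : List (String × String)) (r : Int × String × List String) : Bool :=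
  PySem.Str.strip r.2.1 != "" && matchRuleValue (tagL tags (PySem.Str.strip r.2.1)) r.2.2

def chainA (tags : List (String × String)) : List (Int × String × List String) → Option Int
  | [] => none
  | r :: rs => if rcond tags r then some r.1 else chainA tags rs

def mchain (tags : List (String × String)) : List (Int × String × List String) → Option Int
  | [] => none
  | r :: rs => omin (if rcond tags r then some r.1 else none) (mchain tags rs)

lemma findRule_eq_chainA (tags : List (String × String)) (name : String) :
    ∀ rules : List (String × List String),
      findRule tags name rules = chainA tags (rules.map (fun ru => (levelNum name, ru))) := by
  intro rules
  induction rules with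
  | nil => rfl
  | cons r rs ih =>
    obtain ⟨rkey, vals⟩ := r
    simp only [findRule, List.map, chainA, rcond]
    by_cases hc : (PySem.Str.strip rkey != "" && matchRuleValue (tagL tags (PySem.Str.strip rkey)) vals) = true
    · rw [if_pos hc, if_pos hc]
    · rw [if_neg hc, if_neg hc]
      exact ih

lemma chainA_append (tags : List (String × String)) :
    ∀ rs1 rs2 : List (Int × String × List String),
      chainA tags (rs1 ++ rs2) = (chainA tags rs1).or (chainA tags rs2) := by
  intro rs1 rs2
  induction rs1 with
  | nil => rfl
  | cons r rs ih =>
    simp only [List.cons_append, chainA]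
    by_cases hc : rcond tags r = true
    · rw [if_pos hc, if_pos hc]
      rfl
    · rw [if_neg hc, if_neg hc]
      exact ih

lemma findLevel_eq (tags : List (String × String)) :
    ∀ names : List String,
      findLevel tags names
        = chainA tags (names.flatMap (fun n =>
            ((PySem.Dict.get? genericRiskRules n).getD []).map (fun ru => (levelNum n, ru)))) := by
  intro names
  induction names with
  | nil => rfl
  | cons n ns ih =>
    simp only [findLevel, List.flatMap_cons]
    rw [chainA_append, ← findRule_eq_chainA, ← ih]
    rcases findRule tags n ((PySem.Dict.get? genericRiskRules n).getD []) with _ | r <;> rfl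

lemma classify_eq_chain (tags : List (String × String)) :
    classify_generic_level tags = chainA tags flatRules := by
  unfold classify_generic_level
  rw [findLevel_eq,
    show (["L1", "L2", "L3", "L4"].flatMap (fun n =>
        ((PySem.Dict.get? genericRiskRules n).getD []).map (fun ru => (levelNum n, ru)))) = flatRules
      from by decide]

lemma mchain_lb (tags : List (String × String)) (l : Int) :
    ∀ rs : List (Int × String × List String), (∀ r ∈ rs, l ≤ r.1) →
      ∀ m, mchain tags rs = some m → l ≤ m := by
  intro rs
  induction rs with
  | nil => intro _ m h; simp [mchain] at h
  | cons r rs ih =>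
    intro hall m h
    have h1 := hall r List.mem_cons_self
    have ih' := ih (fun x hx => hall x (List.mem_cons_of_mem _ hx))
    simp only [mchain] at h
    by_cases hc : rcond tags r = true
    · rw [if_pos hc] at h
      rcases hm : mchain tags rs with _ | m' <;> rw [hm] at h <;> simp [omin] at h
      · omega
      · rw [← h]
        exact le_min h1 (ih' m' hm)
    · rw [if_neg hc] at h
      exact ih' m h

lemma chain_eq_mchain (tags : List (String × String)) :
    ∀ rs : List (Int × String × List String),
      rs.Pairwise (fun a b => a.1 ≤ b.1) → chainA tags rs = mchain tags rs := by
  intro rs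
  induction rs with
  | nil => intro _; rfl
  | cons r rs ih =>
    intro hp
    rcases List.pairwise_cons.mp hp with ⟨hle, hp'⟩
    simp only [chainA, mchain]
    by_cases hc : rcond tags r = true
    · rw [if_pos hc, if_pos hc]
      rcases hm : mchain tags rs with _ | m'
      · simp [omin]
      · have := mchain_lb tags r.1 rs (fun x hx => hle x hx) m' hm
        simp [omin, min_eq_left this]
    · rw [if_neg hc, if_neg hc]
      exact ih hp'

lemma classify_eq_mchain (tags : List (String × String)) :
    classify_generic_level tags = mchain tags flatRules := by
  rw [classify_eq_chain, chain_eq_mchain tags flatRules (by decide)]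

-- ----- the cons step on the A side -----

def dcond (k v : String) (r : Int × String × List String) : Bool :=
  PySem.Str.strip r.2.1 != "" && (k == PySem.Str.strip r.2.1) && matchRuleValue (normB v) r.2.2

def dchain (k v : String) : List (Int × String × List String) → Option Int
  | [] => none
  | r :: rs => omin (if dcond k v r then some r.1 else none) (dchain k v rs)

lemma get?_cons (k v key : String) (rest : List (String × String)) :
    PySem.Dict.get? (⟨(k, v) :: rest⟩ : PySem.Dict String String) key
      = if k == key then some v else PySem.Dict.get? (⟨rest⟩ : PySem.Dict String String) key := by
  simp only [PySem.Dict.get?, List.find?]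
  by_cases h : (k == key) = true <;> simp [h]

lemma get?_eq_none_of_not_mem (rest : List (String × String)) (k : String)
    (h : k ∉ rest.map Prod.fst) :
    PySem.Dict.get? (⟨rest⟩ : PySem.Dict String String) k = none := by
  induction rest with
  | nil => rfl
  | cons p rest ih =>
    simp only [List.map, List.mem_cons, not_or] at h
    simp only [PySem.Dict.get?, List.find?]
    have hb : (p.1 == k) = false := by
      simpa [beq_iff_eq] using (fun he => h.1 he.symm)
    rw [hb]
    exact ih h.2

lemma mchain_cons (k v : String) (rest : List (String × String))
    (hk : k ∉ rest.map Prod.fst) :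
    ∀ rs : List (Int × String × List String),
      mchain ((k, v) :: rest) rs = omin (dchain k v rs) (mchain rest rs) := by
  intro rs
  induction rs with
  | nil => rfl
  | cons r rs ih =>
    obtain ⟨lvl, rkey, vals⟩ := r
    simp only [mchain, dchain]
    rw [ih]
    by_cases hke : (k == PySem.Str.strip rkey) = true
    · have hkey : k = PySem.Str.strip rkey := by simpa [beq_iff_eq] using hke
      have hge : PySem.Dict.get? (⟨rest⟩ : PySem.Dict String String) (PySem.Str.strip rkey) = none := by
        rw [← hkey]
        exact get?_eq_none_of_not_mem rest k hk
      have hcons : rcond ((k, v) :: rest) (lvl, rkey, vals) = dcond k v (lvl, rkey, vals) := by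
        simp [rcond, dcond, tagL, normA, normB, get?_cons, hke]
      have hrest : rcond rest (lvl, rkey, vals) = false := by
        simp [rcond, tagL, normA, hge, matchRuleValue,
          show PySem.Str.lower (PySem.Str.strip "") = "" from by decide]
      rw [hcons, hrest]
      rw [show (if (false : Bool) then some lvl else none) = none from rfl, omin_none_left]
      exact (omin_assoc _ _ _).symm
    · have hcons : rcond ((k, v) :: rest) (lvl, rkey, vals) = rcond rest (lvl, rkey, vals) := by
        simp [rcond, tagL, normA, get?_cons, eq_false_of_ne_true hke]
      have hd : dcond k v (lvl, rkey, vals) = false := by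
        simp [dcond, eq_false_of_ne_true hke]
      rw [hcons, hd]
      rw [show (if (false : Bool) then some lvl else none) = none from rfl, omin_none_left]
      exact omin_left_comm _ _ _

-- ----- lowercasing is idempotent (needed to relate A's re-lowering to B's table lookup) -----

lemma upper_shift (c : Char) (h1 : 65 ≤ c.toNat) (h2 : c.toNat ≤ 90) :
    PySem.Chars.isupper (Char.ofNat (c.toNat + 32)) = false := by
  obtain ⟨n, hn⟩ : ∃ n, c.toNat = n := ⟨_, rfl⟩
  rw [hn] at h1 h2 ⊢
  interval_cases n <;> decide

lemma lowerChar_idem (c : Char) :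
    PySem.Chars.lowerChar (PySem.Chars.lowerChar c) = PySem.Chars.lowerChar c := by
  by_cases h : PySem.Chars.isupper c = true
  · have hb : 65 ≤ c.toNat ∧ c.toNat ≤ 90 := by
      have hx := h
      unfold PySem.Chars.isupper at hx
      simp only [Bool.and_eq_true, decide_eq_true_eq] at hx
      constructor
      · exact UInt32.le_iff_toNat_le.mp (show ('A' : Char).val ≤ c.val from hx.1)
      · exact UInt32.le_iff_toNat_le.mp (show c.val ≤ ('Z' : Char).val from hx.2)
    have hs := upper_shift c hb.1 hb.2
    unfold PySem.Chars.lowerChar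
    rw [if_pos h, if_neg (by rw [hs]; exact Bool.false_ne_true)]
  · unfold PySem.Chars.lowerChar
    rw [if_neg h, if_neg h]

lemma lower_idem (s : String) :
    PySem.Str.lower (PySem.Str.lower s) = PySem.Str.lower s := by
  unfold PySem.Str.lower
  congr 1
  rw [show (String.ofList (PySem.Chars.lower s.toList)).toList = PySem.Chars.lower s.toList from by simp]
  unfold PySem.Chars.lower
  rw [List.map_map]
  exact List.map_congr_left (fun c _ => lowerChar_idem c)

lemma norm_lower (v : String) : PySem.Str.lower (normB v) = normB v := by
  unfold normB
  exact lower_idem _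

-- ----- the per-tag candidate agrees with the flattened-rule minimum -----

def exactLit : List ((String × String) × Int) :=
  [(("sac_scale", "demanding_mountain_hiking"), (1 : Int)),
   (("sac_scale", "alpine_hiking"), (1 : Int)),
   (("sac_scale", "demanding_alpine_hiking"), (1 : Int)),
   (("via_ferrata", "yes"), (1 : Int)),
   (("hazard", "falling_rocks"), (1 : Int)),
   (("hazard", "cliff"), (1 : Int)),
   (("hazard", "steep_slope"), (1 : Int)),
   (("highway", "path"), (2 : Int)),
   (("highway", "steps"), (2 : Int)),
   (("highway", "footway"), (2 : Int)),
   (("highway", "bridleway"), (2 : Int)),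
   (("tourism", "viewpoint"), (2 : Int)),
   (("tourism", "attraction"), (2 : Int)),
   (("tourism", "picnic_site"), (2 : Int)),
   (("natural", "peak"), (2 : Int)),
   (("natural", "ridge"), (2 : Int)),
   (("natural", "cliff"), (2 : Int)),
   (("tourism", "guest_house"), (3 : Int)),
   (("tourism", "alpine_hut"), (3 : Int)),
   (("tourism", "camp_site"), (3 : Int)),
   (("tourism", "information"), (3 : Int)),
   (("amenity", "place_of_worship"), (3 : Int)),
   (("amenity", "restaurant"), (3 : Int)),
   (("amenity", "cafe"), (3 : Int)),
   (("amenity", "shelter"), (3 : Int)),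
   (("amenity", "drinking_water"), (3 : Int)),
   (("highway", "tertiary"), (4 : Int)),
   (("highway", "service"), (4 : Int)),
   (("highway", "unclassified"), (4 : Int)),
   (("highway", "track"), (4 : Int)),
   (("amenity", "toilets"), (4 : Int)),
   (("amenity", "parking"), (4 : Int)),
   (("amenity", "bus_station"), (4 : Int)),
   (("amenity", "parking_entrance"), (4 : Int)),
   (("tourism", "hotel"), (4 : Int)),
   (("tourism", "museum"), (4 : Int))]

def wildLit : List (String × Int) := [("aerialway", (3 : Int))]

lemma builtIndexes_eq :
    builtIndexes = ((⟨exactLit⟩ : PySem.Dict (String × String) Int),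
                    (⟨wildLit⟩ : PySem.Dict String Int)) := by decide

lemma prod_beq {α β : Type} [BEq α] [BEq β] (a c : α) (b d : β) :
    ((a, b) == (c, d)) = (a == c && b == d) := rfl

lemma sk1 : PySem.Str.strip "sac_scale" = "sac_scale" := by decide
lemma sk2 : PySem.Str.strip "via_ferrata" = "via_ferrata" := by decide
lemma sk3 : PySem.Str.strip "hazard" = "hazard" := by decide
lemma sk4 : PySem.Str.strip "highway" = "highway" := by decide
lemma sk5 : PySem.Str.strip "tourism" = "tourism" := by decide
lemma sk6 : PySem.Str.strip "natural" = "natural" := by decide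
lemma sk7 : PySem.Str.strip "aerialway" = "aerialway" := by decide
lemma sk8 : PySem.Str.strip "amenity" = "amenity" := by decide

lemma mrvR1 (w : String) (hw : ¬ w = "") (hlw : PySem.Str.lower w = w) :
    matchRuleValue w ["demanding_mountain_hiking", "alpine_hiking", "demanding_alpine_hiking"] = (decide (w = "demanding_mountain_hiking") || (decide (w = "alpine_hiking") || decide (w = "demanding_alpine_hiking"))) := by
  unfold matchRuleValue
  rw [if_neg hw,
    show PySem.Set.ofList (List.map (fun v => PySem.Str.lower (PySem.Str.strip v)) ["demanding_mountain_hiking", "alpine_hiking", "demanding_alpine_hiking"]) = ["demanding_mountain_hiking", "alpine_hiking", "demanding_alpine_hiking"] from by decide,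
    hlw]
  simp [PySem.Set.contains]

lemma mrvR2 (w : String) (hw : ¬ w = "") (hlw : PySem.Str.lower w = w) :
    matchRuleValue w ["yes"] = decide (w = "yes") := by
  unfold matchRuleValue
  rw [if_neg hw,
    show PySem.Set.ofList (List.map (fun v => PySem.Str.lower (PySem.Str.strip v)) ["yes"]) = ["yes"] from by decide,
    hlw]
  simp [PySem.Set.contains]

lemma mrvR3 (w : String) (hw : ¬ w = "") (hlw : PySem.Str.lower w = w) :
    matchRuleValue w ["falling_rocks", "cliff", "steep_slope"] = (decide (w = "falling_rocks") || (decide (w = "cliff") || decide (w = "steep_slope"))) := by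
  unfold matchRuleValue
  rw [if_neg hw,
    show PySem.Set.ofList (List.map (fun v => PySem.Str.lower (PySem.Str.strip v)) ["falling_rocks", "cliff", "steep_slope"]) = ["falling_rocks", "cliff", "steep_slope"] from by decide,
    hlw]
  simp [PySem.Set.contains]

lemma mrvR4 (w : String) (hw : ¬ w = "") (hlw : PySem.Str.lower w = w) :
    matchRuleValue w ["path", "steps", "footway", "bridleway"] = (decide (w = "path") || (decide (w = "steps") || (decide (w = "footway") || decide (w = "bridleway")))) := by
  unfold matchRuleValue
  rw [if_neg hw,
    show PySem.Set.ofList (List.map (fun v => PySem.Str.lower (PySem.Str.strip v)) ["path", "steps", "footway", "bridleway"]) = ["path", "steps", "footway", "bridleway"] from by decide,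
    hlw]
  simp [PySem.Set.contains]

lemma mrvR5 (w : String) (hw : ¬ w = "") (hlw : PySem.Str.lower w = w) :
    matchRuleValue w ["viewpoint", "attraction", "picnic_site"] = (decide (w = "viewpoint") || (decide (w = "attraction") || decide (w = "picnic_site"))) := by
  unfold matchRuleValue
  rw [if_neg hw,
    show PySem.Set.ofList (List.map (fun v => PySem.Str.lower (PySem.Str.strip v)) ["viewpoint", "attraction", "picnic_site"]) = ["viewpoint", "attraction", "picnic_site"] from by decide,
    hlw]
  simp [PySem.Set.contains]

lemma mrvR6 (w : String) (hw : ¬ w = "") (hlw : PySem.Str.lower w = w) :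
    matchRuleValue w ["peak", "ridge", "cliff"] = (decide (w = "peak") || (decide (w = "ridge") || decide (w = "cliff"))) := by
  unfold matchRuleValue
  rw [if_neg hw,
    show PySem.Set.ofList (List.map (fun v => PySem.Str.lower (PySem.Str.strip v)) ["peak", "ridge", "cliff"]) = ["peak", "ridge", "cliff"] from by decide,
    hlw]
  simp [PySem.Set.contains]

lemma mrvR7 (w : String) (hw : ¬ w = "") (hlw : PySem.Str.lower w = w) :
    matchRuleValue w ["*"] = true := by
  unfold matchRuleValue
  rw [if_neg hw,
    show PySem.Set.ofList (List.map (fun v => PySem.Str.lower (PySem.Str.strip v)) ["*"]) = ["*"] from by decide,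
    hlw]
  simp [PySem.Set.contains]

lemma mrvR8 (w : String) (hw : ¬ w = "") (hlw : PySem.Str.lower w = w) :
    matchRuleValue w ["guest_house", "alpine_hut", "camp_site", "information"] = (decide (w = "guest_house") || (decide (w = "alpine_hut") || (decide (w = "camp_site") || decide (w = "information")))) := by
  unfold matchRuleValue
  rw [if_neg hw,
    show PySem.Set.ofList (List.map (fun v => PySem.Str.lower (PySem.Str.strip v)) ["guest_house", "alpine_hut", "camp_site", "information"]) = ["guest_house", "alpine_hut", "camp_site", "information"] from by decide,
    hlw]
  simp [PySem.Set.contains]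

lemma mrvR9 (w : String) (hw : ¬ w = "") (hlw : PySem.Str.lower w = w) :
    matchRuleValue w ["place_of_worship", "restaurant", "cafe", "shelter", "drinking_water"] = (decide (w = "place_of_worship") || (decide (w = "restaurant") || (decide (w = "cafe") || (decide (w = "shelter") || decide (w = "drinking_water"))))) := by
  unfold matchRuleValue
  rw [if_neg hw,
    show PySem.Set.ofList (List.map (fun v => PySem.Str.lower (PySem.Str.strip v)) ["place_of_worship", "restaurant", "cafe", "shelter", "drinking_water"]) = ["place_of_worship", "restaurant", "cafe", "shelter", "drinking_water"] from by decide,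
    hlw]
  simp [PySem.Set.contains]

lemma mrvR10 (w : String) (hw : ¬ w = "") (hlw : PySem.Str.lower w = w) :
    matchRuleValue w ["tertiary", "service", "unclassified", "track"] = (decide (w = "tertiary") || (decide (w = "service") || (decide (w = "unclassified") || decide (w = "track")))) := by
  unfold matchRuleValue
  rw [if_neg hw,
    show PySem.Set.ofList (List.map (fun v => PySem.Str.lower (PySem.Str.strip v)) ["tertiary", "service", "unclassified", "track"]) = ["tertiary", "service", "unclassified", "track"] from by decide,
    hlw]
  simp [PySem.Set.contains]

lemma mrvR11 (w : String) (hw : ¬ w = "") (hlw : PySem.Str.lower w = w) :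
    matchRuleValue w ["toilets", "parking", "bus_station", "parking_entrance"] = (decide (w = "toilets") || (decide (w = "parking") || (decide (w = "bus_station") || decide (w = "parking_entrance")))) := by
  unfold matchRuleValue
  rw [if_neg hw,
    show PySem.Set.ofList (List.map (fun v => PySem.Str.lower (PySem.Str.strip v)) ["toilets", "parking", "bus_station", "parking_entrance"]) = ["toilets", "parking", "bus_station", "parking_entrance"] from by decide,
    hlw]
  simp [PySem.Set.contains]

lemma mrvR12 (w : String) (hw : ¬ w = "") (hlw : PySem.Str.lower w = w) :
    matchRuleValue w ["hotel", "museum"] = (decide (w = "hotel") || decide (w = "museum")) := by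
  unfold matchRuleValue
  rw [if_neg hw,
    show PySem.Set.ofList (List.map (fun v => PySem.Str.lower (PySem.Str.strip v)) ["hotel", "museum"]) = ["hotel", "museum"] from by decide,
    hlw]
  simp [PySem.Set.contains]

def dchainW (k w : String) : List (Int × String × List String) → Option Int
  | [] => none
  | r :: rs =>
    omin (if PySem.Str.strip r.2.1 != "" && (k == PySem.Str.strip r.2.1) && matchRuleValue w r.2.2
          then some r.1 else none) (dchainW k w rs)

lemma dchain_eq_W (k v : String) : ∀ rs, dchain k v rs = dchainW k (normB v) rs := by
  intro rs
  induction rs with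
  | nil => rfl
  | cons r rs ih =>
    simp only [dchain, dchainW, dcond]
    rw [ih]
    rfl

lemma crux2W (k w : String) (hlw : PySem.Str.lower w = w) :
    dchainW k w flatRules
      = if w = "" then none
        else omin (PySem.Dict.get? (⟨wildLit⟩ : PySem.Dict String Int) k)
                  (PySem.Dict.get? (⟨exactLit⟩ : PySem.Dict (String × String) Int) (k, w)) := by
  by_cases hw : w = ""
  · subst hw
    simp [dchainW, flatRules, matchRuleValue, omin]
  · rw [if_neg hw]
    by_cases h1 : k = "sac_scale"
    · subst h1
      simp [dchainW, flatRules, wildLit, exactLit, sk1, sk2, sk3, sk4, sk5, sk6, sk7, sk8, mrvR1 w hw hlw, mrvR2 w hw hlw, mrvR3 w hw hlw, mrvR4 w hw hlw, mrvR5 w hw hlw, mrvR6 w hw hlw, mrvR7 w hw hlw, mrvR8 w hw hlw, mrvR9 w hw hlw, mrvR10 w hw hlw, mrvR11 w hw hlw, mrvR12 w hw hlw, PySem.Dict.get?, prod_beq, omin, omin_none_left, omin_none_right]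
      by_cases hv1 : w = "demanding_mountain_hiking"
      · subst hv1; decide
      ·
        by_cases hv2 : w = "alpine_hiking"
        · subst hv2; decide
        ·
          by_cases hv3 : w = "demanding_alpine_hiking"
          · subst hv3; decide
          ·
            have bv1 : (("demanding_mountain_hiking" : String) == w) = false := by rw [beq_eq_false_iff_ne]; exact fun h => hv1 h.symm
            have bv2 : (("alpine_hiking" : String) == w) = false := by rw [beq_eq_false_iff_ne]; exact fun h => hv2 h.symm
            have bv3 : (("demanding_alpine_hiking" : String) == w) = false := by rw [beq_eq_false_iff_ne]; exact fun h => hv3 h.symm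
            simp [List.find?, PySem.Dict.get?, wildLit, exactLit, prod_beq, omin, omin_none_left, omin_none_right, bv1, bv2, bv3, hv1, hv2, hv3]
    ·
      by_cases h2 : k = "via_ferrata"
      · subst h2
        simp [dchainW, flatRules, wildLit, exactLit, sk1, sk2, sk3, sk4, sk5, sk6, sk7, sk8, mrvR1 w hw hlw, mrvR2 w hw hlw, mrvR3 w hw hlw, mrvR4 w hw hlw, mrvR5 w hw hlw, mrvR6 w hw hlw, mrvR7 w hw hlw, mrvR8 w hw hlw, mrvR9 w hw hlw, mrvR10 w hw hlw, mrvR11 w hw hlw, mrvR12 w hw hlw, PySem.Dict.get?, prod_beq, omin, omin_none_left, omin_none_right]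
        by_cases hv1 : w = "yes"
        · subst hv1; decide
        ·
          have bv1 : (("yes" : String) == w) = false := by rw [beq_eq_false_iff_ne]; exact fun h => hv1 h.symm
          simp [List.find?, PySem.Dict.get?, wildLit, exactLit, prod_beq, omin, omin_none_left, omin_none_right, bv1, hv1]
      ·
        by_cases h3 : k = "hazard"
        · subst h3
          simp [dchainW, flatRules, wildLit, exactLit, sk1, sk2, sk3, sk4, sk5, sk6, sk7, sk8, mrvR1 w hw hlw, mrvR2 w hw hlw, mrvR3 w hw hlw, mrvR4 w hw hlw, mrvR5 w hw hlw, mrvR6 w hw hlw, mrvR7 w hw hlw, mrvR8 w hw hlw, mrvR9 w hw hlw, mrvR10 w hw hlw, mrvR11 w hw hlw, mrvR12 w hw hlw, PySem.Dict.get?, prod_beq, omin, omin_none_left, omin_none_right]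
          by_cases hv1 : w = "falling_rocks"
          · subst hv1; decide
          ·
            by_cases hv2 : w = "cliff"
            · subst hv2; decide
            ·
              by_cases hv3 : w = "steep_slope"
              · subst hv3; decide
              ·
                have bv1 : (("falling_rocks" : String) == w) = false := by rw [beq_eq_false_iff_ne]; exact fun h => hv1 h.symm
                have bv2 : (("cliff" : String) == w) = false := by rw [beq_eq_false_iff_ne]; exact fun h => hv2 h.symm
                have bv3 : (("steep_slope" : String) == w) = false := by rw [beq_eq_false_iff_ne]; exact fun h => hv3 h.symm
                simp [List.find?, PySem.Dict.get?, wildLit, exactLit, prod_beq, omin, omin_none_left, omin_none_right, bv1, bv2, bv3, hv1, hv2, hv3]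
        ·
          by_cases h4 : k = "highway"
          · subst h4
            simp [dchainW, flatRules, wildLit, exactLit, sk1, sk2, sk3, sk4, sk5, sk6, sk7, sk8, mrvR1 w hw hlw, mrvR2 w hw hlw, mrvR3 w hw hlw, mrvR4 w hw hlw, mrvR5 w hw hlw, mrvR6 w hw hlw, mrvR7 w hw hlw, mrvR8 w hw hlw, mrvR9 w hw hlw, mrvR10 w hw hlw, mrvR11 w hw hlw, mrvR12 w hw hlw, PySem.Dict.get?, prod_beq, omin, omin_none_left, omin_none_right]
            by_cases hv1 : w = "path"
            · subst hv1; decide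
            ·
              by_cases hv2 : w = "steps"
              · subst hv2; decide
              ·
                by_cases hv3 : w = "footway"
                · subst hv3; decide
                ·
                  by_cases hv4 : w = "bridleway"
                  · subst hv4; decide
                  ·
                    by_cases hv5 : w = "tertiary"
                    · subst hv5; decide
                    ·
                      by_cases hv6 : w = "service"
                      · subst hv6; decide
                      ·
                        by_cases hv7 : w = "unclassified"
                        · subst hv7; decide
                        ·
                          by_cases hv8 : w = "track"
                          · subst hv8; decide
                          ·
                            have bv1 : (("path" : String) == w) = false := by rw [beq_eq_false_iff_ne]; exact fun h => hv1 h.symm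
                            have bv2 : (("steps" : String) == w) = false := by rw [beq_eq_false_iff_ne]; exact fun h => hv2 h.symm
                            have bv3 : (("footway" : String) == w) = false := by rw [beq_eq_false_iff_ne]; exact fun h => hv3 h.symm
                            have bv4 : (("bridleway" : String) == w) = false := by rw [beq_eq_false_iff_ne]; exact fun h => hv4 h.symm
                            have bv5 : (("tertiary" : String) == w) = false := by rw [beq_eq_false_iff_ne]; exact fun h => hv5 h.symm
                            have bv6 : (("service" : String) == w) = false := by rw [beq_eq_false_iff_ne]; exact fun h => hv6 h.symm
                            have bv7 : (("unclassified" : String) == w) = false := by rw [beq_eq_false_iff_ne]; exact fun h => hv7 h.symm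
                            have bv8 : (("track" : String) == w) = false := by rw [beq_eq_false_iff_ne]; exact fun h => hv8 h.symm
                            simp [List.find?, PySem.Dict.get?, wildLit, exactLit, prod_beq, omin, omin_none_left, omin_none_right, bv1, bv2, bv3, bv4, bv5, bv6, bv7, bv8, hv1, hv2, hv3, hv4, hv5, hv6, hv7, hv8]
          ·
            by_cases h5 : k = "tourism"
            · subst h5
              simp [dchainW, flatRules, wildLit, exactLit, sk1, sk2, sk3, sk4, sk5, sk6, sk7, sk8, mrvR1 w hw hlw, mrvR2 w hw hlw, mrvR3 w hw hlw, mrvR4 w hw hlw, mrvR5 w hw hlw, mrvR6 w hw hlw, mrvR7 w hw hlw, mrvR8 w hw hlw, mrvR9 w hw hlw, mrvR10 w hw hlw, mrvR11 w hw hlw, mrvR12 w hw hlw, PySem.Dict.get?, prod_beq, omin, omin_none_left, omin_none_right]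
              by_cases hv1 : w = "viewpoint"
              · subst hv1; decide
              ·
                by_cases hv2 : w = "attraction"
                · subst hv2; decide
                ·
                  by_cases hv3 : w = "picnic_site"
                  · subst hv3; decide
                  ·
                    by_cases hv4 : w = "guest_house"
                    · subst hv4; decide
                    ·
                      by_cases hv5 : w = "alpine_hut"
                      · subst hv5; decide
                      ·
                        by_cases hv6 : w = "camp_site"
                        · subst hv6; decide
                        ·
                          by_cases hv7 : w = "information"
                          · subst hv7; decide
                          ·
                            by_cases hv8 : w = "hotel"
                            · subst hv8; decide
                            ·
                              by_cases hv9 : w = "museum"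
                              · subst hv9; decide
                              ·
                                have bv1 : (("viewpoint" : String) == w) = false := by rw [beq_eq_false_iff_ne]; exact fun h => hv1 h.symm
                                have bv2 : (("attraction" : String) == w) = false := by rw [beq_eq_false_iff_ne]; exact fun h => hv2 h.symm
                                have bv3 : (("picnic_site" : String) == w) = false := by rw [beq_eq_false_iff_ne]; exact fun h => hv3 h.symm
                                have bv4 : (("guest_house" : String) == w) = false := by rw [beq_eq_false_iff_ne]; exact fun h => hv4 h.symm
                                have bv5 : (("alpine_hut" : String) == w) = false := by rw [beq_eq_false_iff_ne]; exact fun h => hv5 h.symm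
                                have bv6 : (("camp_site" : String) == w) = false := by rw [beq_eq_false_iff_ne]; exact fun h => hv6 h.symm
                                have bv7 : (("information" : String) == w) = false := by rw [beq_eq_false_iff_ne]; exact fun h => hv7 h.symm
                                have bv8 : (("hotel" : String) == w) = false := by rw [beq_eq_false_iff_ne]; exact fun h => hv8 h.symm
                                have bv9 : (("museum" : String) == w) = false := by rw [beq_eq_false_iff_ne]; exact fun h => hv9 h.symm
                                simp [List.find?, PySem.Dict.get?, wildLit, exactLit, prod_beq, omin, omin_none_left, omin_none_right, bv1, bv2, bv3, bv4, bv5, bv6, bv7, bv8, bv9, hv1, hv2, hv3, hv4, hv5, hv6, hv7, hv8, hv9]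
            ·
              by_cases h6 : k = "natural"
              · subst h6
                simp [dchainW, flatRules, wildLit, exactLit, sk1, sk2, sk3, sk4, sk5, sk6, sk7, sk8, mrvR1 w hw hlw, mrvR2 w hw hlw, mrvR3 w hw hlw, mrvR4 w hw hlw, mrvR5 w hw hlw, mrvR6 w hw hlw, mrvR7 w hw hlw, mrvR8 w hw hlw, mrvR9 w hw hlw, mrvR10 w hw hlw, mrvR11 w hw hlw, mrvR12 w hw hlw, PySem.Dict.get?, prod_beq, omin, omin_none_left, omin_none_right]
                by_cases hv1 : w = "peak"
                · subst hv1; decide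
                ·
                  by_cases hv2 : w = "ridge"
                  · subst hv2; decide
                  ·
                    by_cases hv3 : w = "cliff"
                    · subst hv3; decide
                    ·
                      have bv1 : (("peak" : String) == w) = false := by rw [beq_eq_false_iff_ne]; exact fun h => hv1 h.symm
                      have bv2 : (("ridge" : String) == w) = false := by rw [beq_eq_false_iff_ne]; exact fun h => hv2 h.symm
                      have bv3 : (("cliff" : String) == w) = false := by rw [beq_eq_false_iff_ne]; exact fun h => hv3 h.symm
                      simp [List.find?, PySem.Dict.get?, wildLit, exactLit, prod_beq, omin, omin_none_left, omin_none_right, bv1, bv2, bv3, hv1, hv2, hv3]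
              ·
                by_cases h7 : k = "aerialway"
                · subst h7
                  simp [dchainW, flatRules, wildLit, exactLit, sk1, sk2, sk3, sk4, sk5, sk6, sk7, sk8, mrvR1 w hw hlw, mrvR2 w hw hlw, mrvR3 w hw hlw, mrvR4 w hw hlw, mrvR5 w hw hlw, mrvR6 w hw hlw, mrvR7 w hw hlw, mrvR8 w hw hlw, mrvR9 w hw hlw, mrvR10 w hw hlw, mrvR11 w hw hlw, mrvR12 w hw hlw, PySem.Dict.get?, prod_beq, omin, omin_none_left, omin_none_right]
                ·
                  by_cases h8 : k = "amenity"
                  · subst h8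
                    simp [dchainW, flatRules, wildLit, exactLit, sk1, sk2, sk3, sk4, sk5, sk6, sk7, sk8, mrvR1 w hw hlw, mrvR2 w hw hlw, mrvR3 w hw hlw, mrvR4 w hw hlw, mrvR5 w hw hlw, mrvR6 w hw hlw, mrvR7 w hw hlw, mrvR8 w hw hlw, mrvR9 w hw hlw, mrvR10 w hw hlw, mrvR11 w hw hlw, mrvR12 w hw hlw, PySem.Dict.get?, prod_beq, omin, omin_none_left, omin_none_right]
                    by_cases hv1 : w = "place_of_worship"
                    · subst hv1; decide
                    ·
                      by_cases hv2 : w = "restaurant"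
                      · subst hv2; decide
                      ·
                        by_cases hv3 : w = "cafe"
                        · subst hv3; decide
                        ·
                          by_cases hv4 : w = "shelter"
                          · subst hv4; decide
                          ·
                            by_cases hv5 : w = "drinking_water"
                            · subst hv5; decide
                            ·
                              by_cases hv6 : w = "toilets"
                              · subst hv6; decide
                              ·
                                by_cases hv7 : w = "parking"
                                · subst hv7; decide
                                ·
                                  by_cases hv8 : w = "bus_station"
                                  · subst hv8; decide
                                  ·
                                    by_cases hv9 : w = "parking_entrance"
                                    · subst hv9; decide
                                    ·
                                      have bv1 : (("place_of_worship" : String) == w) = false := by rw [beq_eq_false_iff_ne]; exact fun h => hv1 h.symm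
                                      have bv2 : (("restaurant" : String) == w) = false := by rw [beq_eq_false_iff_ne]; exact fun h => hv2 h.symm
                                      have bv3 : (("cafe" : String) == w) = false := by rw [beq_eq_false_iff_ne]; exact fun h => hv3 h.symm
                                      have bv4 : (("shelter" : String) == w) = false := by rw [beq_eq_false_iff_ne]; exact fun h => hv4 h.symm
                                      have bv5 : (("drinking_water" : String) == w) = false := by rw [beq_eq_false_iff_ne]; exact fun h => hv5 h.symm
                                      have bv6 : (("toilets" : String) == w) = false := by rw [beq_eq_false_iff_ne]; exact fun h => hv6 h.symm
                                      have bv7 : (("parking" : String) == w) = false := by rw [beq_eq_false_iff_ne]; exact fun h => hv7 h.symm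
                                      have bv8 : (("bus_station" : String) == w) = false := by rw [beq_eq_false_iff_ne]; exact fun h => hv8 h.symm
                                      have bv9 : (("parking_entrance" : String) == w) = false := by rw [beq_eq_false_iff_ne]; exact fun h => hv9 h.symm
                                      simp [List.find?, PySem.Dict.get?, wildLit, exactLit, prod_beq, omin, omin_none_left, omin_none_right, bv1, bv2, bv3, bv4, bv5, bv6, bv7, bv8, bv9, hv1, hv2, hv3, hv4, hv5, hv6, hv7, hv8, hv9]
                  ·
                    have n1 : ¬ "sac_scale" = k := fun h => h1 h.symm
                    have n2 : ¬ "via_ferrata" = k := fun h => h2 h.symm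
                    have n3 : ¬ "hazard" = k := fun h => h3 h.symm
                    have n4 : ¬ "highway" = k := fun h => h4 h.symm
                    have n5 : ¬ "tourism" = k := fun h => h5 h.symm
                    have n6 : ¬ "natural" = k := fun h => h6 h.symm
                    have n7 : ¬ "aerialway" = k := fun h => h7 h.symm
                    have n8 : ¬ "amenity" = k := fun h => h8 h.symm
                    have b1 : (("sac_scale" : String) == k) = false := by rw [beq_eq_false_iff_ne]; exact n1
                    have b2 : (("via_ferrata" : String) == k) = false := by rw [beq_eq_false_iff_ne]; exact n2
                    have b3 : (("hazard" : String) == k) = false := by rw [beq_eq_false_iff_ne]; exact n3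
                    have b4 : (("highway" : String) == k) = false := by rw [beq_eq_false_iff_ne]; exact n4
                    have b5 : (("tourism" : String) == k) = false := by rw [beq_eq_false_iff_ne]; exact n5
                    have b6 : (("natural" : String) == k) = false := by rw [beq_eq_false_iff_ne]; exact n6
                    have b7 : (("aerialway" : String) == k) = false := by rw [beq_eq_false_iff_ne]; exact n7
                    have b8 : (("amenity" : String) == k) = false := by rw [beq_eq_false_iff_ne]; exact n8
                    simp [dchainW, flatRules, wildLit, exactLit, sk1, sk2, sk3, sk4, sk5, sk6, sk7, sk8, mrvR1 w hw hlw, mrvR2 w hw hlw, mrvR3 w hw hlw, mrvR4 w hw hlw, mrvR5 w hw hlw, mrvR6 w hw hlw, mrvR7 w hw hlw, mrvR8 w hw hlw, mrvR9 w hw hlw, mrvR10 w hw hlw, mrvR11 w hw hlw, mrvR12 w hw hlw, PySem.Dict.get?, prod_beq, omin, omin_none_left, omin_none_right, List.find?, h1, h2, h3, h4, h5, h6, h7, h8, b1, b2, b3, b4, b5, b6, b7, b8]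

lemma crux2 (k v : String) : dchain k v flatRules = fB (k, v) := by
  rw [dchain_eq_W, crux2W k (normB v) (norm_lower v)]
  simp only [fB]
  rw [builtIndexes_eq]

-- ===== VERDICT (by name: the statement is the Claim_ definition above) =====
theorem classify_generic_level_spec : Claim_equal_classify_generic_level := by
  unfold Claim_equal_classify_generic_level
  intro tags
  induction tags with
  | nil =>
    intro _ _
    decide
  | cons kv rest ih =>
    intro hdom hpre
    obtain ⟨k, v⟩ := kv
    have hpre' : (k :: rest.map Prod.fst).Nodup := hpre
    have hk : k ∉ rest.map Prod.fst := (List.nodup_cons.mp hpre').1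
    have hrest : Pre_classify_generic_level rest := (List.nodup_cons.mp hpre').2
    have hdomr : Dom_classify_generic_level rest := by
      unfold Dom_classify_generic_level at hdom ⊢
      simp only [List.all_cons, Bool.and_eq_true] at hdom
      exact hdom.2
    have ihr : classify_generic_level rest = classify_generic_level_alt rest := ih hdomr hrest
    show classify_generic_level ((k, v) :: rest) = classify_generic_level_alt ((k, v) :: rest)
    rw [classify_eq_mchain, mchain_cons k v rest hk flatRules, crux2, alt_cons,
      ← classify_eq_mchain, ihr]
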